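-- pv_equiv track=rewrite | github.com/AlexLaim/Lab3-python | main.py | ReplaceNum
-- ===== SOURCE A (Python) =====
-- def ReplaceNum(string):
--     words = string.split(' ')
--     for i in range(len(words)):
--         lit = list(words[i])
--         for j in range(len(lit)):
--             if lit[j].isdigit():
--                 lit[j] = '*'
--         words[i] = ''.join(lit)
--     return ' '.join(words)
-- ===== SOURCE B (Python) =====
-- def ReplaceNum(string):
--     return ''.join('*' if c.isdigit() else c for c in string)
-- ===== Notes on version B (the rewrite author's own statement) =====
-- stated objective: simpler
-- what changed: Replaced the split-on-space / per-word / per-character nested loops with one flat pass over the characters of the whole string, since splitting on a single space and rejoining with the same separator reconstructs the string exactly.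
import Mathlib
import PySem

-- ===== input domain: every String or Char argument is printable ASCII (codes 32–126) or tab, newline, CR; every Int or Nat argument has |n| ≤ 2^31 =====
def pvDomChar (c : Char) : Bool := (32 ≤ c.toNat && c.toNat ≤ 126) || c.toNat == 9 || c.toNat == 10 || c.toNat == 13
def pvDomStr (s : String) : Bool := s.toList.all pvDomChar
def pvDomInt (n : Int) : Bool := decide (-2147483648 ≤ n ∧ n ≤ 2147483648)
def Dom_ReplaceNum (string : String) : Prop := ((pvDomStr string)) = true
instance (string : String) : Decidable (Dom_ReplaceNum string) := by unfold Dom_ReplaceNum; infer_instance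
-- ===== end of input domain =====

-- B replaces A's split-on-space / per-word / per-character nested loops by one flat pass
-- over the characters of the whole string (objective: simpler).

-- ===== PORT A =====
-- inner loop: for j in range(len(lit)): if lit[j].isdigit(): lit[j] = '*'
def pvRNInner (lit : List Char) : List Char :=
  (PySem.List.pyRange 0 lit.length).foldl
    (fun lt j =>
      match PySem.List.pyGet? lt j with
      | some c => if PySem.Chars.isdigit c then lt.set j.toNat '*' else lt
      | none => lt) lit

def ReplaceNum (string : String) : String :=
  -- words = string.split(' ')  (sep " " is nonempty, so split? is always `some`)
  let words := (PySem.Str.split? string " ").getD []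
  -- for i in range(len(words)): … ; words[i] = ''.join(lit)
  let words :=
    (PySem.List.pyRange 0 words.length).foldl
      (fun ws i =>
        match PySem.List.pyGet? ws i with
        | some w => ws.set i.toNat
            (PySem.Str.join "" ((pvRNInner w.toList).map (fun c => String.ofList [c])))
        | none => ws) words
  PySem.Str.join " " words

-- ===== PORT B =====
def ReplaceNum_alt (string : String) : String :=
  String.ofList (string.toList.map (fun c => if PySem.Chars.isdigit c then '*' else c))

-- ===== PRECONDITION & SPEC =====
def Spec_ReplaceNum (string : String) (out : String) : Prop := out = ReplaceNum_alt string
instance (string : String) (out : String) : Decidable (Spec_ReplaceNum string out) := by unfold Spec_ReplaceNum; infer_instance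

-- ===== CLAIM (what is proved, stated in full; the proofs are below) =====
def Claim_equal_ReplaceNum : Prop := ∀ (string : String), Dom_ReplaceNum string → Spec_ReplaceNum string (ReplaceNum string)

-- ===== LEMMAS AND PROOFS =====

-- the character map B applies
def pvRNf (c : Char) : Char := if PySem.Chars.isdigit c then '*' else c

-- a fold over range(len(xs)) that rewrites xs[i] := u xs[i] is List.map u
theorem pvRN_foldl_idxset {α : Type} (body : List α → Int → List α) (u : α → α)
    (hb : ∀ (ws : List α) (j : Int) (c : α), 0 ≤ j → PySem.List.pyGet? ws j = some c →
        body ws j = ws.set j.toNat (u c)) (n : Nat) :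
    ∀ (d k : Nat), k + d = n → ∀ xs : List α, xs.length = n →
      (PySem.List.pyRange k n).foldl body xs = xs.take k ++ (xs.drop k).map u := by
  intro d
  induction d with
  | zero =>
      intro k hk xs hxs
      have hk' : k = n := by omega
      subst hk'
      simp only [PySem.List.pyRange_one, sub_self, Int.toNat_zero, List.range_zero,
        List.map_nil, List.foldl_nil]
      rw [List.take_of_length_le (by omega), List.drop_of_length_le (by omega)]
      simp
  | succ d ih =>
      intro k hk xs hxs
      have hlt : (k : Int) < n := by exact_mod_cast (by omega : k < n)
      rw [PySem.List.pyRange_one_cons hlt, List.foldl_cons]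
      have hkn : k < xs.length := by omega
      have hget : PySem.List.pyGet? xs (k : Int) = some xs[k] := by
        rw [PySem.List.pyGet?_natCast]; exact List.getElem?_eq_getElem hkn
      rw [hb xs (k : Int) xs[k] (by positivity) hget]
      have : ((k : Int)).toNat = k := by simp
      rw [this]
      have h1 : ((k : Int) + 1) = ((k + 1 : Nat) : Int) := by push_cast; ring
      rw [h1]
      rw [ih (k + 1) (by omega) _ (by simp [hxs])]
      have hd : (xs.set k (u xs[k])).drop (k + 1) = xs.drop (k + 1) := by
        rw [List.drop_set]; simp
      have ht : (xs.set k (u xs[k])).take (k + 1) = xs.take k ++ [u xs[k]] := by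
        rw [List.take_set]
        rw [List.take_add_one, List.getElem?_eq_getElem hkn]
        simp only [Option.toList_some]
        have hlen : (xs.take k).length = k := by simp [hkn.le]
        rw [show (xs.take k ++ [xs[k]]).set k (u xs[k])
              = xs.take k ++ ([xs[k]].set (k - (xs.take k).length) (u xs[k])) from by
          rw [List.set_append_right _ _ (by omega)]]
        simp [hlen]
      rw [hd, ht, List.drop_eq_getElem_cons hkn, List.map_cons, List.append_assoc,
        List.singleton_append]

-- the inner loop over a word is List.map pvRNf
theorem pvRNInner_eq_map (lit : List Char) : pvRNInner lit = lit.map pvRNf := by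
  have := pvRN_foldl_idxset
      (fun lt j =>
        match PySem.List.pyGet? lt j with
        | some c => if PySem.Chars.isdigit c then lt.set j.toNat '*' else lt
        | none => lt) pvRNf
      (by
        intro ws j c hj hget
        simp only [hget]
        by_cases hd : PySem.Chars.isdigit c
        · simp [hd, pvRNf]
        · have hcj : ws[j.toNat]? = some c := by
            rw [← PySem.List.pyGet?_natCast, Int.toNat_of_nonneg hj]; exact hget
          have hjlt : j.toNat < ws.length := by
            by_contra h
            rw [List.getElem?_eq_none (by omega)] at hcj
            simp at hcj
          have hc : ws[j.toNat] = c := by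
            have h2 := List.getElem?_eq_getElem hjlt
            rw [h2] at hcj; exact (Option.some.injEq _ _).mp hcj
          have h3 : pvRNf c = c := by simp [pvRNf, hd]
          rw [h3, if_neg hd, ← hc, List.set_getElem_self])
      lit.length lit.length 0 (by omega) lit rfl
  simpa using this

-- join with separator: merging the last two pieces with the separator in between
theorem pvRN_join_append_pair (sep a b : List Char) :
    ∀ xs : List (List Char),
      PySem.Chars.join sep (xs ++ [a, b]) = PySem.Chars.join sep (xs ++ [a ++ sep ++ b]) := by
  intro xs
  induction xs with
  | nil => simp [PySem.Chars.join, List.intercalate]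
  | cons x xs ih =>
      have h1 : PySem.Chars.join sep ((x :: xs) ++ [a, b])
          = x ++ sep ++ PySem.Chars.join sep (xs ++ [a, b]) := by
        cases xs with
        | nil => exact PySem.Chars.join_cons_cons sep x a [b]
        | cons y ys => exact PySem.Chars.join_cons_cons sep x y (ys ++ [a, b])
      have h2 : PySem.Chars.join sep ((x :: xs) ++ [a ++ sep ++ b])
          = x ++ sep ++ PySem.Chars.join sep (xs ++ [a ++ sep ++ b]) := by
        cases xs with
        | nil => simp [PySem.Chars.join, List.intercalate]
        | cons y ys => exact PySem.Chars.join_cons_cons sep x y (ys ++ [a ++ sep ++ b])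
      rw [h1, h2, ih]

-- invariant of split-on-' ' followed by ' '-join after mapping a space-preserving f over each piece
theorem pvRN_go_join (f : Char → Char) (hf : f ' ' = ' ') :
    ∀ (fuel : Nat) (l cur : List Char) (acc : List (List Char)), l.length ≤ fuel →
      PySem.Chars.join [' '] ((PySem.Chars.splitOn.go [' '] fuel l cur acc).map (List.map f))
        = PySem.Chars.join [' '] (acc.reverse.map (List.map f) ++ [cur.reverse.map f ++ l.map f]) := by
  intro fuel
  induction fuel with
  | zero =>
      intro l cur acc hl
      have : l = [] := List.length_eq_zero_iff.mp (by omega)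
      subst this
      rw [PySem.Chars.splitOn.go]
      simp
  | succ fuel ih =>
      intro l cur acc hl
      cases l with
      | nil =>
          rw [PySem.Chars.splitOn.go]
          simp
          omega
      | cons c rest =>
          rw [PySem.Chars.splitOn.go]
          by_cases hc : c = ' '
          · subst hc
            have hpre : [' '].isPrefixOf (' ' :: rest) = true := by
              simp [List.isPrefixOf]
            rw [if_pos hpre]
            simp only [List.length_cons] at hl
            have hdrop : List.drop ([' '] : List Char).length (' ' :: rest) = rest := by simp
            rw [hdrop, ih rest [] (cur.reverse :: acc) (by omega)]
            have hA : ((cur.reverse :: acc).reverse.map (List.map f))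
                = acc.reverse.map (List.map f) ++ [cur.reverse.map f] := by simp
            rw [hA]
            simp only [List.reverse_nil, List.map_nil, List.nil_append]
            rw [show acc.reverse.map (List.map f) ++ [cur.reverse.map f] ++ [rest.map f]
                  = acc.reverse.map (List.map f) ++ [cur.reverse.map f, rest.map f] from by simp]
            rw [pvRN_join_append_pair]
            simp [hf]
          · have hpre : [' '].isPrefixOf (c :: rest) = false := by
              simp [List.isPrefixOf]
              intro h; exact absurd h.symm hc
            rw [if_neg (by simp [hpre])]
            simp only [List.length_cons] at hl
            rw [ih _ _ _ (by omega)]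
            simp

-- split on ' ', map a space-preserving f over each piece, rejoin with ' '  =  map f
theorem pvRN_split_join (f : Char → Char) (hf : f ' ' = ' ') (cs : List Char) :
    PySem.Chars.join [' '] ((PySem.Chars.splitOn cs [' ']).map (List.map f)) = cs.map f := by
  unfold PySem.Chars.splitOn
  rw [pvRN_go_join f hf (cs.length + 1) cs [] [] (by omega)]
  simp [PySem.Chars.join, List.intercalate]

theorem pvRNf_space : pvRNf ' ' = ' ' := by decide

-- ===== VERDICT (by name: the statement is the Claim_ definition above) =====
theorem ReplaceNum_spec : Claim_equal_ReplaceNum := by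
  intro string _
  unfold Spec_ReplaceNum
  have hsplit : (PySem.Str.split? string " ").getD []
      = (PySem.Chars.splitOn string.toList [' ']).map String.ofList := by
    simp [PySem.Str.split?, PySem.Chars.split?]
  have hword : ∀ p : List Char,
      PySem.Str.join "" ((pvRNInner p).map (fun c => String.ofList [c]))
        = String.ofList (p.map pvRNf) := by
    intro p
    rw [pvRNInner_eq_map]
    have h2 : PySem.Str.join "" ((p.map pvRNf).map (fun c => String.ofList [c]))
        = String.ofList (PySem.Chars.join [] ((p.map pvRNf).map (fun c => [c]))) := by
      unfold PySem.Str.join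
      congr 1
      apply congrArg
      rw [List.map_map, List.map_map, List.map_map]
      apply List.map_congr_left
      intro c _
      simp [Function.comp]
    rw [h2, PySem.Chars.join_nil_singletons]
  have hfold := pvRN_foldl_idxset
      (fun ws i => match PySem.List.pyGet? ws i with
        | some w => ws.set i.toNat
            (PySem.Str.join "" ((pvRNInner w.toList).map (fun c => String.ofList [c])))
        | none => ws)
      (fun w => PySem.Str.join "" ((pvRNInner w.toList).map (fun c => String.ofList [c])))
      (by intro ws j c hj hget; simp [hget])
      ((PySem.Chars.splitOn string.toList [' ']).map String.ofList).length
      ((PySem.Chars.splitOn string.toList [' ']).map String.ofList).length 0 (by omega) _ rfl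
  simp only [List.take_zero, List.drop_zero, List.nil_append, Nat.cast_zero] at hfold
  simp only [ReplaceNum, hsplit]
  rw [hfold]
  -- collapse the per-word maps and rejoin
  rw [List.map_map]
  have hcomp : ((fun w => PySem.Str.join "" ((pvRNInner w.toList).map (fun c => String.ofList [c])))
        ∘ String.ofList) = fun p => String.ofList (p.map pvRNf) := by
    funext p
    simp only [Function.comp]
    rw [show (String.ofList p).toList = p from by simp, hword p]
  rw [hcomp]
  unfold PySem.Str.join ReplaceNum_alt
  congr 1
  rw [List.map_map]
  have hcomp2 : (String.toList ∘ fun p => String.ofList (List.map pvRNf p))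
      = List.map pvRNf := by
    funext p; simp
  rw [hcomp2]
  have hsep : (" " : String).toList = [' '] := rfl
  rw [hsep, pvRN_split_join pvRNf pvRNf_space]
  simp [pvRNf]
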